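-- pv_equiv track=rewrite | github.com/Kevinwen1999/Ragavan | Ragavan_Discord_TTS/ragavan_voice_TTS.py | chunk_text
-- ===== SOURCE A (Python) =====
-- from typing import Dict, List, Optional
--
-- def chunk_text(text: str, max_len: int = 400) -> List[str]:
--     # Avoid extremely long single calls. XTTS can handle long text, but chunking improves stability.
--     lines = []
--     for para in text.split("\n"):
--         para = para.strip()
--         if not para:
--             continue
--         while len(para) > max_len:
--             # split on nearest space
--             cut = para.rfind(" ", 0, max_len)
--             if cut == -1:
--                 cut = max_len
--             lines.append(para[:cut])
--             para = para[cut:].strip()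
--         if para:
--             lines.append(para)
--     return lines if lines else ["..."]
-- ===== SOURCE B (Python) =====
-- def chunk_text(text: str, max_len: int = 400):
--     # Two-stage per paragraph: first compute the (start, end) index pairs of all
--     # chunks with a moving start index (one pass, no repeated tail slicing/strip),
--     # then slice them out; O(n) instead of A's O(n^2/max_len).
--     def cuts(para):
--         n = len(para)
--         i = 0
--         while n - i > max_len:
--             cut = para.rfind(" ", i, i + max_len)
--             if cut == -1:
--                 cut = i + max_len
--             yield (i, cut)
--             while cut < n and para[cut].isspace():
--                 cut += 1
--             i = cut
--         if i < n:
--             yield (i, n)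
--     chunks = [para[s:e]
--               for para in map(str.strip, text.split("\n"))
--               for s, e in cuts(para)]
--     return chunks or ["..."]
-- ===== Notes on version B (the rewrite author's own statement) =====
-- stated objective: faster
-- what changed: B splits the work into two stages per paragraph: a single pass with a moving start index that only computes the (start,end) index pairs of all chunks, then a slicing stage that materialises them (via a flat comprehension over stripped paragraphs), instead of A's repeated slicing-off and re-stripping of the paragraph tail.
-- outside the precondition, e.g. on chunk_text(' ', -1): A returns ['...'], B raises IndexError; on chunk_text('', 0): A returns ['...'], B returns ['...']
import Mathlib
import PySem

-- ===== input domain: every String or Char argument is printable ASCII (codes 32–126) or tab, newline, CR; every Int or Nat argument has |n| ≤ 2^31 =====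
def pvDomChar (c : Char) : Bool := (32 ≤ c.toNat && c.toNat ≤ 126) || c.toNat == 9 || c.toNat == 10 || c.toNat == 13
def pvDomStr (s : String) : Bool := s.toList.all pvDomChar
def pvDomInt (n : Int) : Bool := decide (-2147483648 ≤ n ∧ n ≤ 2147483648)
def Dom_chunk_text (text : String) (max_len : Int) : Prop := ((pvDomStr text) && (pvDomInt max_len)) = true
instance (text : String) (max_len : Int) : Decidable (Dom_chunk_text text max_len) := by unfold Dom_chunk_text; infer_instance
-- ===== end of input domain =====

-- B replaces A's repeated tail slicing/re-stripping by a two-stage pipeline: one pass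
-- computing chunk index pairs per paragraph, then a slicing stage; equivalence of
-- return values is proved for max_len ≥ 1.

-- ===== PORT A =====
-- the 'while len(para) > max_len' loop; fuel = para.length + 1 suffices whenever
-- max_len ≥ 1 and para is stripped (each iteration consumes at least one character)
def chunkLoopA (ml : Int) : Nat → List Char → List (List Char) → List (List Char)
  | fuel, para, acc =>
    if (para.length : Int) > ml then
      match fuel with
      | 0 => acc   -- fuel exhausted: unreachable under Pre_
      | fuel + 1 =>
        let r := PySem.Chars.rfindFrom para [' '] 0 (some ml)   -- para.rfind(" ", 0, max_len)
        let cut : Int := if r = -1 then ml else r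
        chunkLoopA ml fuel
          (PySem.Chars.strip (PySem.List.slice para (some cut) none))   -- para[cut:].strip()
          (acc ++ [PySem.List.slice para none (some cut)])              -- lines.append(para[:cut])
    else
      if para ≠ [] then acc ++ [para] else acc                          -- if para: lines.append(para)

def chunk_text (text : String) (max_len : Int) : List String :=
  let lines := ((PySem.Chars.split? text.toList ['\n']).getD []).foldl  -- text.split("\n")
    (fun acc p =>
      let para := PySem.Chars.strip p
      if para = [] then acc                                             -- if not para: continue
      else chunkLoopA max_len (para.length + 1) para acc) []
  (if lines = [] then [['.', '.', '.']] else lines).map (fun cs => String.ofList cs)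

-- ===== PORT B =====
-- 'while cut < n and para[cut].isspace(): cut += 1'
def skipWS (para : List Char) (k : Nat) : Nat :=
  if h : k < para.length then
    if PySem.Chars.isspace para[k] then skipWS para (k + 1) else k
  else k
termination_by para.length - k
decreasing_by omega

-- B's generator 'cuts': the (start, end) index pairs of the chunks of one paragraph
def chunkCuts (ml : Int) (para : List Char) : Nat → Nat → List (Nat × Nat)
  | fuel, i =>
    if ((para.length : Int) - i) > ml then
      match fuel with
      | 0 => []   -- fuel exhausted: unreachable under Pre_
      | fuel + 1 =>
        let r := PySem.Chars.rfindFrom para [' '] (i : Int) (some ((i : Int) + ml)) -- para.rfind(" ", i, i+max_len)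
        let cut : Int := if r = -1 then (i : Int) + ml else r
        (i, cut.toNat) :: chunkCuts ml para fuel (skipWS para cut.toNat)  -- yield (i, cut); skip ws; i = cut
    else
      if i < para.length then [(i, para.length)] else []                  -- yield (i, n)

def chunk_text_alt (text : String) (max_len : Int) : List String :=
  -- [para[s:e] for para in map(str.strip, text.split("\n")) for s, e in cuts(para)]
  let chunks := (((PySem.Chars.split? text.toList ['\n']).getD []).map PySem.Chars.strip).flatMap
    (fun para => (chunkCuts max_len para (para.length + 1) 0).map
      (fun se => PySem.List.slice para (some (se.1 : Int)) (some (se.2 : Int))))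
  (if chunks = [] then [['.', '.', '.']] else chunks).map (fun cs => String.ofList cs)

-- ===== PRECONDITION & SPEC =====
-- Pre_ requires max_len ≥ 1: for max_len ≤ 0 the Python A never terminates on any text
-- containing a non-whitespace character (on all-whitespace text it still returns ["..."],
-- which Pre_ also excludes — see the cite in the claim).
def Pre_chunk_text (text : String) (max_len : Int) : Prop := 1 ≤ max_len
instance (text : String) (max_len : Int) : Decidable (Pre_chunk_text text max_len) := by
  unfold Pre_chunk_text; infer_instance

def pvWitness_chunk_text : String × Int := ("hello brave new world", 7)

def Spec_chunk_text (text : String) (max_len : Int) (out : List String) : Prop := out = chunk_text_alt text max_len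
instance (text : String) (max_len : Int) (out : List String) : Decidable (Spec_chunk_text text max_len out) := by unfold Spec_chunk_text; infer_instance

-- ===== CLAIM (what is proved, stated in full; the proofs are below) =====
def Claim_equal_chunk_text : Prop := ∀ (text : String) (max_len : Int), Dom_chunk_text text max_len → Pre_chunk_text text max_len → Spec_chunk_text text max_len (chunk_text text max_len)

-- ===== LEMMAS AND PROOFS =====

-- whitespace/strip toolbox
theorem dropWhile_fix_head (p : Char → Bool) (c : Char) (t : List Char)
    (h : List.dropWhile p (c :: t) = c :: t) : p c = false := by
  cases hc : p c
  · rfl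
  · exfalso
    rw [List.dropWhile_cons] at h
    simp only [hc, if_true] at h
    have hl := List.length_dropWhile_le p t
    rw [h] at hl
    simp only [List.length_cons] at hl
    omega

theorem dropWhile_fix_take (p : Char → Bool) (l : List Char) (h : List.dropWhile p l = l)
    (m : Nat) : List.dropWhile p (l.take m) = l.take m := by
  cases l with
  | nil => simp
  | cons c t =>
    cases m with
    | zero => simp
    | succ m => simp [dropWhile_fix_head p c t h]

theorem rstrip_eq_take (s : List Char) : ∃ m, PySem.Chars.rstrip s = s.take m := by
  obtain ⟨u, hu⟩ := List.dropWhile_suffix (l := s.reverse) PySem.Chars.isspace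
  refine ⟨s.length - u.length, ?_⟩
  have hdrop : List.dropWhile PySem.Chars.isspace s.reverse = s.reverse.drop u.length := by
    conv_rhs => rw [← hu]
    rw [List.drop_left]
  show (List.dropWhile PySem.Chars.isspace s.reverse).reverse = _
  rw [hdrop, List.reverse_drop, List.reverse_reverse, List.length_reverse]

theorem lstrip_fix_rstrip (s : List Char) (h : PySem.Chars.lstrip s = s) :
    PySem.Chars.lstrip (PySem.Chars.rstrip s) = PySem.Chars.rstrip s := by
  obtain ⟨m, hm⟩ := rstrip_eq_take s
  rw [hm]
  exact dropWhile_fix_take _ _ h m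

theorem lstrip_idem (s : List Char) : PySem.Chars.lstrip (PySem.Chars.lstrip s) = PySem.Chars.lstrip s := by
  simp [PySem.Chars.lstrip, List.dropWhile_idempotent]

theorem rstrip_rev (s : List Char) (h : PySem.Chars.rstrip s = s) :
    List.dropWhile PySem.Chars.isspace s.reverse = s.reverse := by
  have := congrArg List.reverse h
  simpa [PySem.Chars.rstrip] using this

theorem rstrip_drop_fix (para : List Char) (h : PySem.Chars.rstrip para = para) (k : Nat) :
    PySem.Chars.rstrip (para.drop k) = para.drop k := by
  have h1 : (para.drop k).reverse = para.reverse.take (para.length - k) := List.reverse_drop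
  have h2 := dropWhile_fix_take PySem.Chars.isspace para.reverse (rstrip_rev para h) (para.length - k)
  calc PySem.Chars.rstrip (para.drop k)
      = (List.dropWhile PySem.Chars.isspace (para.drop k).reverse).reverse := rfl
    _ = (para.reverse.take (para.length - k)).reverse := by rw [h1, h2]
    _ = para.drop k := by rw [← h1, List.reverse_reverse]

theorem strip_lstrip_fix (s : List Char) :
    PySem.Chars.lstrip (PySem.Chars.strip s) = PySem.Chars.strip s :=
  lstrip_fix_rstrip _ (lstrip_idem s)

theorem strip_rstrip_fix (s : List Char) :
    PySem.Chars.rstrip (PySem.Chars.strip s) = PySem.Chars.strip s := by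
  simp [PySem.Chars.strip, PySem.Chars.rstrip, List.reverse_reverse, List.dropWhile_idempotent]

-- skipWS characterisation
theorem skipWS_ge (para : List Char) (k : Nat) : k ≤ skipWS para k := by
  fun_induction skipWS para k with
  | case1 k h hws ih => omega
  | case2 k h hws => omega
  | case3 k h => omega

theorem skipWS_le (para : List Char) (k : Nat) (h : k ≤ para.length) :
    skipWS para k ≤ para.length := by
  fun_induction skipWS para k with
  | case1 k h1 hws ih => exact ih (by omega)
  | case2 k h1 hws => omega
  | case3 k h1 => omega

theorem skipWS_drop (para : List Char) (k : Nat) :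
    para.drop (skipWS para k) = List.dropWhile PySem.Chars.isspace (para.drop k) := by
  fun_induction skipWS para k with
  | case1 k h hws ih =>
    rw [ih, List.drop_eq_getElem_cons h, List.dropWhile_cons, hws]
    simp
  | case2 k h hws =>
    rw [List.drop_eq_getElem_cons h, List.dropWhile_cons]
    simp at hws
    simp [hws, ← List.drop_eq_getElem_cons h]
  | case3 k h =>
    rw [List.drop_eq_nil_of_le (by omega), List.dropWhile_nil]

-- rfind returns -1 or an index where sub occurs
theorem rfind_go_spec (s sub : List Char) (j : Nat) :
    PySem.Chars.rfind.go s sub j = -1 ∨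
      ∃ k : Nat, PySem.Chars.rfind.go s sub j = (k : Int) ∧ sub.isPrefixOf (s.drop k) = true := by
  induction j with
  | zero =>
    by_cases h : sub.isPrefixOf s = true
    · right; exact ⟨0, by simp [PySem.Chars.rfind.go, h], by simpa using h⟩
    · left; simp [PySem.Chars.rfind.go, h]
  | succ j ih =>
    by_cases h : sub.isPrefixOf (s.drop (j + 1)) = true
    · right; exact ⟨j + 1, by simp [PySem.Chars.rfind.go, h], h⟩
    · have : PySem.Chars.rfind.go s sub (j + 1) = PySem.Chars.rfind.go s sub j := by
        simp [PySem.Chars.rfind.go, h]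
      rw [this]; exact ih

theorem rfind_spec (s sub : List Char) :
    PySem.Chars.rfind s sub = -1 ∨
      ∃ k : Nat, PySem.Chars.rfind s sub = (k : Int) ∧ sub.isPrefixOf (s.drop k) = true :=
  rfind_go_spec s sub s.length

-- a found single space: the character there is a space
theorem space_prefix_getElem (xs : List Char) (k : Nat)
    (h : [' '].isPrefixOf (xs.drop k) = true) : k < xs.length ∧ xs[k]? = some ' ' := by
  rw [List.isPrefixOf_iff_prefix] at h
  obtain ⟨t, ht⟩ := h
  have h0 : (xs.drop k)[0]? = some ' ' := by rw [← ht]; rfl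
  rw [List.getElem?_drop] at h0
  simp only [Nat.add_zero] at h0
  exact ⟨(List.getElem?_eq_some_iff.mp h0).1, h0⟩

-- rfindFrom on an in-range window reduces to rfind on the window
theorem rfindFrom_window (s sub : List Char) (st en : Int) (h0 : 0 ≤ st) (hse : st ≤ en)
    (hen : en < s.length) :
    PySem.Chars.rfindFrom s sub st (some en) =
      (if PySem.Chars.rfind ((s.drop st.toNat).take (en - st).toNat) sub = -1 then -1
       else st + PySem.Chars.rfind ((s.drop st.toNat).take (en - st).toNat) sub) := by
  have hwin : (s.take en.toNat).drop st.toNat = (s.drop st.toNat).take (en - st).toNat := by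
    rw [List.drop_take]
    congr 1
    omega
  simp only [PySem.Chars.rfindFrom]
  simp only [if_neg (show ¬ ((s.length : Int) < en) by omega), if_neg (show ¬ en < 0 by omega),
    if_neg (show ¬ st < 0 by omega), if_neg (show ¬ en < st by omega)]
  rw [hwin]

-- the slicing stage applied to one index pair
def sliceOf (para : List Char) (se : Nat × Nat) : List Char :=
  PySem.List.slice para (some (se.1 : Int)) (some (se.2 : Int))

-- one paragraph: A's shrinking-string loop equals the slices of B's index pairs
theorem chunk_loop_eq_cuts (ml : Int) (hml : 1 ≤ ml) (para : List Char)
    (hstrip : PySem.Chars.rstrip para = para) (i : Nat) (hi : i ≤ para.length)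
    (hlead : PySem.Chars.lstrip (para.drop i) = para.drop i)
    (fuelA fuelB : Nat) (hfA : para.length - i < fuelA) (hfB : para.length - i < fuelB)
    (acc : List (List Char)) :
    chunkLoopA ml fuelA (para.drop i) acc =
      acc ++ (chunkCuts ml para fuelB i).map (sliceOf para) := by
  induction fuelA generalizing i fuelB acc with
  | zero => omega
  | succ fA ih =>
    have hlen : ((para.drop i).length : Int) = (para.length : Int) - i := by
      simp [List.length_drop]; omega
    obtain ⟨fB, rfl⟩ : ∃ f, fuelB = f + 1 := ⟨fuelB - 1, by omega⟩
    rw [chunkLoopA, chunkCuts.eq_def]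
    simp only []
    by_cases hc : ((para.length : Int) - i) > ml
    · rw [if_pos (by rw [hlen]; exact hc), if_pos hc]
      have hilen : i < para.length := by omega
      -- the two rfind calls search the same window
      have hwA : PySem.Chars.rfindFrom (para.drop i) [' '] 0 (some ml) =
          (if PySem.Chars.rfind ((para.drop i).take ml.toNat) [' '] = -1 then -1
           else PySem.Chars.rfind ((para.drop i).take ml.toNat) [' ']) := by
        have := rfindFrom_window (para.drop i) [' '] 0 ml le_rfl (by omega) (by omega)
        simpa using this
      have hwB : PySem.Chars.rfindFrom para [' '] (i : Int) (some ((i : Int) + ml)) =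
          (if PySem.Chars.rfind ((para.drop i).take ml.toNat) [' '] = -1 then -1
           else (i : Int) + PySem.Chars.rfind ((para.drop i).take ml.toNat) [' ']) := by
        have := rfindFrom_window para [' '] (i : Int) ((i : Int) + ml) (by omega) (by omega)
          (by omega)
        simpa using this
      -- both cut positions name the same relative cut c, with 1 ≤ c ≤ ml
      have hcut : ∃ c : Nat, 1 ≤ c ∧ (c : Int) ≤ ml ∧
          (if PySem.Chars.rfindFrom (para.drop i) [' '] 0 (some ml) = -1 then ml
             else PySem.Chars.rfindFrom (para.drop i) [' '] 0 (some ml)) = (c : Int) ∧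
          (if PySem.Chars.rfindFrom para [' '] (i : Int) (some ((i : Int) + ml)) = -1
             then (i : Int) + ml
             else PySem.Chars.rfindFrom para [' '] (i : Int) (some ((i : Int) + ml)))
            = (i : Int) + (c : Int) := by
        rcases rfind_spec ((para.drop i).take ml.toNat) [' '] with hneg | ⟨k, hk, hpre⟩
        · refine ⟨ml.toNat, by omega, by omega, ?_, ?_⟩
          · rw [hwA, if_pos hneg]
            simp
            omega
          · rw [hwB, if_pos hneg]
            simp
            omega
        · obtain ⟨hklt, hkget⟩ := space_prefix_getElem _ _ hpre
          have hkml : (k : Int) < ml := by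
            have := List.length_take_le ml.toNat (para.drop i)
            omega
          have hk1 : 1 ≤ k := by
            rcases Nat.eq_zero_or_pos k with h0 | h1
            · exfalso
              subst h0
              -- the head of para.drop i would be a space, contradicting lstrip-fixedness
              obtain ⟨c, t, hct⟩ : ∃ c t, para.drop i = c :: t := by
                cases hd : para.drop i with
                | nil =>
                  exfalso
                  have hdl : (para.drop i).length = 0 := by rw [hd]; rfl
                  rw [List.length_drop] at hdl
                  omega
                | cons c t => exact ⟨c, t, rfl⟩
              have hhead : c = ' ' := by
                rw [hct] at hkget
                cases hmt : ml.toNat with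
                | zero => omega
                | succ m =>
                  rw [hmt] at hkget
                  simp [List.take] at hkget
                  exact hkget
              have := dropWhile_fix_head PySem.Chars.isspace c t (by rw [← hct]; exact hlead)
              rw [hhead] at this
              simp [PySem.Chars.isspace] at this
            · exact h1
          have hkne : ¬ (PySem.Chars.rfind ((para.drop i).take ml.toNat) [' '] = -1) := by
            rw [hk]; omega
          refine ⟨k, hk1, by omega, ?_, ?_⟩
          · rw [hwA, if_neg hkne, hk]
            have : ¬ ((k : Int) = -1) := by omega
            simp [this]
          · rw [hwB, if_neg hkne, hk]
            have : ¬ ((i : Int) + (k : Int) = -1) := by omega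
            simp [this]
      obtain ⟨c, hc1, hcml, hcvalA, hcvalB⟩ := hcut
      -- the chunk A appends equals the slice of B's emitted pair
      have hchunk : PySem.List.slice (para.drop i) none
            (some (if PySem.Chars.rfindFrom (para.drop i) [' '] 0 (some ml) = -1 then ml
              else PySem.Chars.rfindFrom (para.drop i) [' '] 0 (some ml)))
          = sliceOf para (i, ((i : Int) + (c : Int)).toNat) := by
        rw [hcvalA]
        unfold sliceOf
        have hn : (((((i : Int) + (c : Int)).toNat : Nat) : Int)) = (i : Int) + (c : Int) := by
          omega
        rw [hn, PySem.List.slice_to _ (by omega),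
          PySem.List.slice_toNat _ (by omega) (by omega)]
        congr 1
        omega
      -- the next states agree
      have hnext : PySem.Chars.strip (PySem.List.slice (para.drop i)
            (some (if PySem.Chars.rfindFrom (para.drop i) [' '] 0 (some ml) = -1 then ml
              else PySem.Chars.rfindFrom (para.drop i) [' '] 0 (some ml))) none)
          = para.drop (skipWS para (i + c)) := by
        rw [hcvalA, PySem.List.slice_from _ (by omega)]
        have hcn : ((c : Int)).toNat = c := by omega
        rw [hcn, List.drop_drop]
        show PySem.Chars.rstrip (PySem.Chars.lstrip (para.drop (i + c))) = _
        rw [PySem.Chars.lstrip, ← skipWS_drop para (i + c)]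
        rw [rstrip_drop_fix para hstrip]
      have hinext : skipWS para (i + c) ≤ para.length :=
        skipWS_le para (i + c) (by omega)
      have higt : i + c ≤ skipWS para (i + c) := skipWS_ge para (i + c)
      have hleadnext : PySem.Chars.lstrip (para.drop (skipWS para (i + c))) =
          para.drop (skipWS para (i + c)) := by
        rw [skipWS_drop para (i + c)]
        simp [PySem.Chars.lstrip, List.dropWhile_idempotent]
      have hBnat : ((i : Int) + (c : Int)).toNat = i + c := by omega
      rw [hcvalB, hBnat, hnext]
      rw [List.map_cons]
      rw [ih (skipWS para (i + c)) hinext hleadnext fB (by omega) (by omega)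
        (acc ++ [PySem.List.slice (para.drop i) none
          (some (if PySem.Chars.rfindFrom (para.drop i) [' '] 0 (some ml) = -1 then ml
            else PySem.Chars.rfindFrom (para.drop i) [' '] 0 (some ml)))])]
      rw [hchunk, hBnat]
      simp
    · rw [if_neg (by rw [hlen]; exact hc), if_neg hc]
      by_cases hd : i < para.length
      · have hne : para.drop i ≠ [] := by
          simp [List.drop_eq_nil_iff]
          omega
        rw [if_pos hd, if_pos hne]
        unfold sliceOf
        rw [List.map_cons, List.map_nil]
        have hsl : PySem.List.slice para (some ((i : Nat) : Int)) (some ((para.length : Nat) : Int))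
            = para.drop i := by
          rw [PySem.List.slice_toNat para (a := ((i : Nat) : Int))
            (b := ((para.length : Nat) : Int)) (by omega) (by omega)]
          simp only [Int.toNat_natCast]
          rw [List.take_of_length_le (by simp [List.length_drop])]
        rw [hsl]
      · have hne : ¬ (para.drop i ≠ []) := by
          simp [List.drop_eq_nil_iff]
          omega
        rw [if_neg hd, if_neg hne]
        simp

-- per paragraph, A's fold step appends exactly the slices of B's index pairs
theorem para_step_eq (ml : Int) (hml : 1 ≤ ml) (acc : List (List Char)) (p : List Char) :
    (let para := PySem.Chars.strip p
     if para = [] then acc else chunkLoopA ml (para.length + 1) para acc) =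
    acc ++ (chunkCuts ml (PySem.Chars.strip p)
      ((PySem.Chars.strip p).length + 1) 0).map (sliceOf (PySem.Chars.strip p)) := by
  simp only []
  set para := PySem.Chars.strip p with hp
  by_cases h : para = []
  · rw [if_pos h, chunkCuts.eq_def]
    simp only []
    rw [if_neg (by simp [h]; omega), if_neg (by simp [h])]
    simp
  · rw [if_neg h]
    have := chunk_loop_eq_cuts ml hml para (strip_rstrip_fix p) 0 (by omega)
      (by simpa using strip_lstrip_fix p) (para.length + 1) (para.length + 1)
      (by omega) (by omega) acc
    simpa using this

-- ===== VERDICT (by name: the statement is the Claim_ definition above) =====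
theorem chunk_text_spec : Claim_equal_chunk_text := by
  unfold Claim_equal_chunk_text
  intro text max_len _ hpre
  unfold Spec_chunk_text chunk_text chunk_text_alt
  have hfun : (fun (acc : List (List Char)) (p : List Char) =>
      let para := PySem.Chars.strip p
      if para = [] then acc else chunkLoopA max_len (para.length + 1) para acc) =
      (fun (acc : List (List Char)) (p : List Char) =>
        acc ++ (chunkCuts max_len (PySem.Chars.strip p)
          ((PySem.Chars.strip p).length + 1) 0).map (sliceOf (PySem.Chars.strip p))) := by
    funext acc p
    exact para_step_eq max_len hpre acc p
  rw [hfun]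
  rw [PySem.List.foldl_append_eq_flatMap]
  rw [List.flatMap_map]
  rfl
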